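-- pv_equiv track=rewrite | github.com/LucaCtt/LibreLog | libre_log/regex_manager.py | is_punctuation_or_space
-- ===== SOURCE A (Python) =====
-- import string
--
-- def is_punctuation_or_space(input_string):
--     """
--     Checks if the input string consists only of punctuation or spaces, or if the string
--     has less than 3 non-punctuation and non-space characters.
--
--     Args:
--         input_string (str): The string to be checked.
--
--     Returns:
--         bool: True if the string consists only of punctuation or spaces, or has less than
--               3 non-punctuation and non-space characters, False otherwise.
--     """
--     allowed_chars = string.punctuation + " "
--     filtered_string = "".join(
--         char for char in input_string if char not in allowed_chars
--     )
--     return (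
--         all(char in allowed_chars for char in input_string) or len(filtered_string) < 3
--     )
-- ===== SOURCE B (Python) =====
-- import string
--
-- def is_punctuation_or_space(input_string):
--     allowed = set(string.punctuation + " ")
--     count = 0
--     for char in input_string:
--         if char not in allowed:
--             count += 1
--             if count >= 3:
--                 return False
--     return True
-- ===== Notes on version B (the rewrite author's own statement) =====
-- stated objective: faster
-- what changed: Replaces A's two full scans (an all() membership scan plus a join-filter whose length is compared to 3) with a single early-exit loop that counts non-allowed characters and returns False as soon as the count reaches 3, exploiting that A's all() branch is redundant.
import Mathlib
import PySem

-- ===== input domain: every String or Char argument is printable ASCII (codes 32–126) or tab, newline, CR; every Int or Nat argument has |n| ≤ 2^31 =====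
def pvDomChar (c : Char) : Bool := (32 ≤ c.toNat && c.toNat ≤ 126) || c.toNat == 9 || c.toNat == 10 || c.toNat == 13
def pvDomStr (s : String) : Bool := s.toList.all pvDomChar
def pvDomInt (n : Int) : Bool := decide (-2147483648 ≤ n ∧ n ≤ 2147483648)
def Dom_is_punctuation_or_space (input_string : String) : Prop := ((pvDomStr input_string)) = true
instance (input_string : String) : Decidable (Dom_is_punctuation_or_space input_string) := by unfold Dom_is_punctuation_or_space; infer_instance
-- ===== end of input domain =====

-- B replaces A's two full scans with one early-exit counting loop (objective: simpler).

-- ===== PORT A =====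
-- string.punctuation + " "
def pvAllowedChars : List Char := ("!\"#$%&'()*+,-./:;<=>?@[\\]^_`{|}~" ++ " ").toList

def is_punctuation_or_space (input_string : String) : Bool :=
  let allowed_chars := pvAllowedChars
  let filtered_string := input_string.toList.filter (fun c => !(allowed_chars.contains c))
  (input_string.toList.all (fun c => allowed_chars.contains c)) || decide (filtered_string.length < 3)

-- ===== PORT B =====
-- the for-loop of Source B: counter of non-allowed chars, early return False at 3
def pvLoopB (allowed : PySem.Set Char) : List Char → Nat → Bool
  | [], _ => true
  | c :: cs, count =>
    if !(PySem.Set.contains allowed c) then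
      if count + 1 ≥ 3 then false else pvLoopB allowed cs (count + 1)
    else pvLoopB allowed cs count

def is_punctuation_or_space_alt (input_string : String) : Bool :=
  let allowed := PySem.Set.ofList (("!\"#$%&'()*+,-./:;<=>?@[\\]^_`{|}~" ++ " ").toList)
  pvLoopB allowed input_string.toList 0

-- ===== PRECONDITION & SPEC =====
def Spec_is_punctuation_or_space (input_string : String) (out : Bool) : Prop := out = is_punctuation_or_space_alt input_string
instance (input_string : String) (out : Bool) : Decidable (Spec_is_punctuation_or_space input_string out) := by unfold Spec_is_punctuation_or_space; infer_instance

-- ===== CLAIM (what is proved, stated in full; the proofs are below) =====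
def Claim_equal_is_punctuation_or_space : Prop := ∀ (input_string : String), Dom_is_punctuation_or_space input_string → Spec_is_punctuation_or_space input_string (is_punctuation_or_space input_string)

-- ===== LEMMAS AND PROOFS =====

-- set(punctuation + " ") keeps the list unchanged: the literal has no duplicates
lemma pvOfList_allowed :
    PySem.Set.ofList (("!\"#$%&'()*+,-./:;<=>?@[\\]^_`{|}~" ++ " ").toList) = pvAllowedChars := by
  decide

-- the early-exit loop computes "count + (number of non-allowed chars) < 3"
lemma pvLoopB_spec (cs : List Char) : ∀ count : Nat, count < 3 →
    pvLoopB pvAllowedChars cs count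
      = decide (count + (cs.filter (fun c => !(pvAllowedChars.contains c))).length < 3) := by
  induction cs with
  | nil => intro count h; simp [pvLoopB]; omega
  | cons c cs ih =>
    intro count h
    by_cases hc : c ∈ pvAllowedChars
    · simp [pvLoopB, PySem.Set.contains, hc, ih count h]
    · by_cases h3 : count + 1 ≥ 3
      · simp only [pvLoopB, PySem.Set.contains]
        simp [hc, h3]
        omega
      · simp only [pvLoopB, PySem.Set.contains]
        simp [hc, h3, ih (count + 1) (by omega)]
        omega

-- ===== VERDICT (by name: the statement is the Claim_ definition above) =====
theorem is_punctuation_or_space_spec : Claim_equal_is_punctuation_or_space := by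
  intro s _
  simp only [Spec_is_punctuation_or_space, is_punctuation_or_space, is_punctuation_or_space_alt]
  rw [pvOfList_allowed, pvLoopB_spec s.toList 0 (by omega)]
  simp
  intro h
  have hnil : List.filter (fun c => !decide (c ∈ pvAllowedChars)) s.toList = [] :=
    List.filter_eq_nil_iff.mpr (fun c hc => by simp [h c hc])
  simp [hnil]
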